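-- pv_equiv track=rewrite | github.com/wangpatrick57/plant | scripts/node_pair_extraction_helpers.py | create_node_favorite_pairs
-- ===== SOURCE A (Python) =====
-- from collections import defaultdict
--
-- def create_node_favorite_pairs(node_pair_voting):
--     node_favorite_pairs = defaultdict(set)
--
--     for base, votes in node_pair_voting.items():
--         max_count = max([count for count in votes.values()])
--
--         for node, count in votes.items():
--             if count == max_count:
--                 node_favorite_pairs[base].add(node)
--
--     return node_favorite_pairs
-- ===== SOURCE B (Python) =====
-- from collections import defaultdict
--
-- def create_node_favorite_pairs(node_pair_voting):
--     node_favorite_pairs = defaultdict(set)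
--
--     for base, votes in node_pair_voting.items():
--         index = defaultdict(set)
--         for node, count in votes.items():
--             index[count].add(node)
--         node_favorite_pairs[base] = index[max(index)]
--
--     return node_favorite_pairs
-- ===== Notes on version B (the rewrite author's own statement) =====
-- stated objective: idiomatic
-- what changed: Per base, B builds a count-to-set bucket index (defaultdict(set)) in a single pass over the votes and assigns the bucket of the maximum count, replacing A's compute-max-then-rescan-and-filter two-pass structure.
import Mathlib
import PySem

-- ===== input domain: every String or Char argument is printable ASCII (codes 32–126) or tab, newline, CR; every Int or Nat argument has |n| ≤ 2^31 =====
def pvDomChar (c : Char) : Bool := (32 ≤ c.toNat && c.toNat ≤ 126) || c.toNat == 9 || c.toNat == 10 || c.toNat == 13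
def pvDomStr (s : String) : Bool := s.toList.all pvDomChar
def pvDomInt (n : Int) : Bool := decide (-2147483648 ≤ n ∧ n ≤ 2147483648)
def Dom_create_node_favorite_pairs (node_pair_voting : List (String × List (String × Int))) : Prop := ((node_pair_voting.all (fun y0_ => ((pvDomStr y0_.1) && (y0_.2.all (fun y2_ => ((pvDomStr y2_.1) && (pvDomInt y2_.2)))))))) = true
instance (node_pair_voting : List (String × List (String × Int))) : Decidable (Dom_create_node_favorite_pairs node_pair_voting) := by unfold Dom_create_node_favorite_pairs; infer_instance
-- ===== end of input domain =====

-- B replaces A's per-base "compute max then re-scan and filter" by a one-pass count→set bucket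
-- index whose top bucket is assigned directly (idiomatic group-by; same cost, no speed claim).

-- ===== PORT A =====
def create_node_favorite_pairs (node_pair_voting : List (String × List (String × Int))) : List (String × List String) :=
  (node_pair_voting.foldl
    (fun (acc : PySem.Dict String (PySem.Set String)) bv =>
      -- max_count = max([count for count in votes.values()]); none = ValueError, excluded by Pre_
      match PySem.List.max? (bv.2.map (fun nc => nc.2)) (fun c => c) with
      | none => acc
      | some mc =>
        bv.2.foldl
          (fun a nc =>
            if nc.2 = mc then
              -- node_favorite_pairs[base].add(node)  (defaultdict(set))
              PySem.Dict.modify a bv.1 PySem.Set.empty (fun s => PySem.Set.add s nc.1)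
            else a)
          acc)
    PySem.Dict.empty).items

-- ===== PORT B =====
def create_node_favorite_pairs_alt (node_pair_voting : List (String × List (String × Int))) : List (String × List String) :=
  (node_pair_voting.foldl
    (fun (acc : PySem.Dict String (PySem.Set String)) bv =>
      -- index[count].add(node)  (local defaultdict(set))
      let idx : PySem.Dict Int (PySem.Set String) :=
        bv.2.foldl
          (fun i nc => PySem.Dict.modify i nc.2 PySem.Set.empty (fun s => PySem.Set.add s nc.1))
          PySem.Dict.empty
      -- max(index) over the keys; none = ValueError, excluded by Pre_
      match PySem.List.max? idx.keys (fun c => c) with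
      | none => acc
      -- index[mc]: the key is always present (mc is a member of idx.keys), so getD is exact here
      | some mc => PySem.Dict.insert acc bv.1 (PySem.Dict.getD idx mc PySem.Set.empty))
    PySem.Dict.empty).items

-- ===== PRECONDITION & SPEC =====
-- Pre_ excludes inputs with an empty inner votes dict, on which A's max() raises ValueError (B's
-- max() raises too), and association lists whose outer keys are not distinct, which do not
-- represent any Python dict input.
def Pre_create_node_favorite_pairs (node_pair_voting : List (String × List (String × Int))) : Prop :=
  (node_pair_voting.map Prod.fst).Nodup ∧ ∀ bv ∈ node_pair_voting, bv.2 ≠ []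
instance (node_pair_voting : List (String × List (String × Int))) : Decidable (Pre_create_node_favorite_pairs node_pair_voting) := by unfold Pre_create_node_favorite_pairs; infer_instance
def pvWitness_create_node_favorite_pairs : (List (String × List (String × Int))) :=
  [("a", [("x", 1), ("y", 2)]), ("b", [("z", -1)])]
def Spec_create_node_favorite_pairs (node_pair_voting : List (String × List (String × Int))) (out : List (String × List String)) : Prop := out = create_node_favorite_pairs_alt node_pair_voting
instance (node_pair_voting : List (String × List (String × Int))) (out : List (String × List String)) : Decidable (Spec_create_node_favorite_pairs node_pair_voting out) := by unfold Spec_create_node_favorite_pairs; infer_instance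

-- ===== CLAIM (what is proved, stated in full; the proofs are below) =====
def Claim_equal_create_node_favorite_pairs : Prop := ∀ (node_pair_voting : List (String × List (String × Int))), Dom_create_node_favorite_pairs node_pair_voting → Pre_create_node_favorite_pairs node_pair_voting → Spec_create_node_favorite_pairs node_pair_voting (create_node_favorite_pairs node_pair_voting)

-- ===== LEMMAS AND PROOFS =====

-- max(set(xs)) = max(xs) for ints: the first-extremal element of the deduplicated list is the same value.
lemma pv_max_ofList (xs : List Int) :
    PySem.List.max? (PySem.Set.ofList xs) (fun c => c) = PySem.List.max? xs (fun c => c) := by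
  cases h1 : PySem.List.max? (PySem.Set.ofList xs) (fun c => c) with
  | none =>
    rw [PySem.List.max?_eq_none_iff] at h1
    cases h2 : PySem.List.max? xs (fun c => c) with
    | none => rfl
    | some m =>
      have hm := PySem.List.max?_mem h2
      have : m ∈ PySem.Set.ofList xs := (PySem.Set.mem_ofList xs m).mpr hm
      rw [h1] at this; cases this
  | some m1 =>
    cases h2 : PySem.List.max? xs (fun c => c) with
    | none =>
      rw [PySem.List.max?_eq_none_iff] at h2
      subst h2
      have : m1 ∈ (PySem.Set.ofList ([] : List Int)) := PySem.List.max?_mem h1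
      cases this
    | some m2 =>
      have hm1 : m1 ∈ xs := (PySem.Set.mem_ofList xs m1).mp (PySem.List.max?_mem h1)
      have hm2 : m2 ∈ PySem.Set.ofList xs := (PySem.Set.mem_ofList xs m2).mpr (PySem.List.max?_mem h2)
      have h12 : m1 ≤ m2 := PySem.List.max?_isMax h2 m1 hm1
      have h21 : m2 ≤ m1 := PySem.List.max?_isMax h1 m2 hm2
      have : m1 = m2 := le_antisymm h12 h21
      rw [this]

-- the bucket of count c in B's index is the Set.add-fold over the nodes whose count is c
lemma pv_getD_idx (l : List (String × Int)) (d : PySem.Dict Int (PySem.Set String)) (c : Int) :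
    (l.foldl (fun i nc => PySem.Dict.modify i nc.2 PySem.Set.empty (fun s => PySem.Set.add s nc.1)) d).getD c PySem.Set.empty
      = ((l.filter (fun nc => decide (nc.2 = c))).map Prod.fst).foldl PySem.Set.add (d.getD c PySem.Set.empty) := by
  induction l generalizing d with
  | nil => rfl
  | cons p t ih =>
    simp only [List.foldl_cons, List.filter_cons]
    rw [ih]
    by_cases hp : p.2 = c
    · simp [hp]
    · simp [hp, PySem.Dict.getD_modify, Ne.symm hp]

-- repeated defaultdict-add at one fresh key: the fold keeps extending the same appended entry
lemma pv_A_inner_ins (l : List (String × Int)) (acc : PySem.Dict String (PySem.Set String))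
    (base : String) (s : PySem.Set String) :
    l.foldl (fun a nc => PySem.Dict.modify a base PySem.Set.empty (fun t => PySem.Set.add t nc.1))
        (acc.insert base s)
      = acc.insert base ((l.map Prod.fst).foldl PySem.Set.add s) := by
  induction l generalizing s with
  | nil => rfl
  | cons p t ih =>
    simp only [List.foldl_cons, List.map_cons]
    have hstep : (acc.insert base s).modify base PySem.Set.empty (fun t => PySem.Set.add t p.1)
        = acc.insert base (PySem.Set.add s p.1) := by
      unfold PySem.Dict.modify
      rw [PySem.Dict.getD_insert_self, PySem.Dict.insert_insert_self]
    rw [hstep, ih]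

-- A's inner loop over the votes, at a base not yet in the accumulator
lemma pv_A_inner (votes : List (String × Int)) (acc : PySem.Dict String (PySem.Set String))
    (base : String) (mc : Int) (hfresh : acc.contains base = false)
    (hmem : ∃ nc ∈ votes, nc.2 = mc) :
    votes.foldl
        (fun a nc => if nc.2 = mc then PySem.Dict.modify a base PySem.Set.empty (fun s => PySem.Set.add s nc.1) else a)
        acc
      = acc.insert base (((votes.filter (fun nc => decide (nc.2 = mc))).map Prod.fst).foldl PySem.Set.add PySem.Set.empty) := by
  rw [PySem.List.foldl_ite_eq_foldl_filter]
  have hne : votes.filter (fun nc => decide (nc.2 = mc)) ≠ [] := by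
    obtain ⟨nc, hnc, hc⟩ := hmem
    intro h
    have : nc ∈ votes.filter (fun nc => decide (nc.2 = mc)) := by
      rw [List.mem_filter]; exact ⟨hnc, by simp [hc]⟩
    rw [h] at this; cases this
  cases hl : votes.filter (fun nc => decide (nc.2 = mc)) with
  | nil => exact absurd hl hne
  | cons p t =>
    simp only [List.foldl_cons, List.map_cons]
    have hstep : acc.modify base PySem.Set.empty (fun s => PySem.Set.add s p.1)
        = acc.insert base (PySem.Set.add PySem.Set.empty p.1) := by
      unfold PySem.Dict.modify
      rw [PySem.Dict.getD_of_not_contains acc PySem.Set.empty hfresh]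
    rw [hstep, pv_A_inner_ins]

-- the two outer folds agree whenever the remaining bases are fresh, distinct, and non-empty
lemma pv_main (npv : List (String × List (String × Int))) :
    ∀ (acc : PySem.Dict String (PySem.Set String)),
    (npv.map Prod.fst).Nodup →
    (∀ bv ∈ npv, acc.contains bv.1 = false) →
    (∀ bv ∈ npv, bv.2 ≠ []) →
    npv.foldl
      (fun (acc : PySem.Dict String (PySem.Set String)) bv =>
        match PySem.List.max? (bv.2.map (fun nc => nc.2)) (fun c => c) with
        | none => acc
        | some mc =>
          bv.2.foldl
            (fun a nc =>
              if nc.2 = mc then PySem.Dict.modify a bv.1 PySem.Set.empty (fun s => PySem.Set.add s nc.1) else a)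
            acc) acc
    = npv.foldl
      (fun (acc : PySem.Dict String (PySem.Set String)) bv =>
        let idx : PySem.Dict Int (PySem.Set String) :=
          bv.2.foldl
            (fun i nc => PySem.Dict.modify i nc.2 PySem.Set.empty (fun s => PySem.Set.add s nc.1))
            PySem.Dict.empty
        match PySem.List.max? idx.keys (fun c => c) with
        | none => acc
        | some mc => PySem.Dict.insert acc bv.1 (PySem.Dict.getD idx mc PySem.Set.empty)) acc := by
  induction npv with
  | nil => intro acc _ _ _; rfl
  | cons bv t ih =>
    intro acc hnd hfresh hne
    simp only [List.foldl_cons]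
    -- the keys of B's index are the deduplicated counts, so both max computations agree
    have hkeys : (bv.2.foldl
        (fun i nc => PySem.Dict.modify i nc.2 PySem.Set.empty (fun s => PySem.Set.add s nc.1))
        PySem.Dict.empty).keys = PySem.Set.ofList (bv.2.map (fun nc => nc.2)) := by
      rw [PySem.Dict.keys_foldl_modify_key bv.2 (fun nc => nc.2) PySem.Set.empty
            (fun _ nc => fun s => PySem.Set.add s nc.1) PySem.Dict.empty]
      rfl
    have hmax : PySem.List.max?
        ((bv.2.foldl
          (fun i nc => PySem.Dict.modify i nc.2 PySem.Set.empty (fun s => PySem.Set.add s nc.1))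
          PySem.Dict.empty).keys) (fun c => c)
        = PySem.List.max? (bv.2.map (fun nc => nc.2)) (fun c => c) := by
      rw [hkeys, pv_max_ofList]
    cases hm : PySem.List.max? (bv.2.map (fun nc => nc.2)) (fun c => c) with
    | none =>
      rw [PySem.List.max?_eq_none_iff, List.map_eq_nil_iff] at hm
      exact absurd hm (hne bv (List.mem_cons_self))
    | some mc =>
      have hmem : ∃ nc ∈ bv.2, nc.2 = mc := by
        have := PySem.List.max?_mem hm
        obtain ⟨nc, hnc, hc⟩ := List.mem_map.mp this
        exact ⟨nc, hnc, hc⟩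
      have hstepA := pv_A_inner bv.2 acc bv.1 mc (hfresh bv (List.mem_cons_self)) hmem
      have hstepB : PySem.Dict.getD
          (bv.2.foldl
            (fun i nc => PySem.Dict.modify i nc.2 PySem.Set.empty (fun s => PySem.Set.add s nc.1))
            PySem.Dict.empty) mc PySem.Set.empty
          = ((bv.2.filter (fun nc => decide (nc.2 = mc))).map Prod.fst).foldl PySem.Set.add PySem.Set.empty := by
        rw [pv_getD_idx, PySem.Dict.getD_empty]
      simp only [hmax, hm, hstepA, hstepB]
      -- both sides continue from the same accumulator
      apply ih
      · exact (List.nodup_cons.mp hnd).2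
      · intro cv hcv
        rw [PySem.Dict.contains_insert]
        have hne1 : cv.1 ≠ bv.1 := by
          intro h
          exact (List.nodup_cons.mp hnd).1 (h ▸ List.mem_map_of_mem hcv)
        simp [hne1, hfresh cv (List.mem_cons_of_mem bv hcv)]
      · exact fun cv hcv => hne cv (List.mem_cons_of_mem bv hcv)

-- ===== VERDICT (by name: the statement is the Claim_ definition above) =====
theorem create_node_favorite_pairs_spec : Claim_equal_create_node_favorite_pairs := by
  intro npv _ hpre
  unfold Spec_create_node_favorite_pairs create_node_favorite_pairs create_node_favorite_pairs_alt
  exact congrArg PySem.Dict.items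
    (pv_main npv PySem.Dict.empty hpre.1
      (fun bv _ => PySem.Dict.contains_empty bv.1) hpre.2)
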